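-- pv_equiv track=rewrite | github.com/claydeman/Machine_Learning | decisionTree.py | justifylabel
-- ===== SOURCE A (Python) =====
-- def justifylabel(x):
--     temp=[]
--     for i in range(len(x)):
--         temp.append(x[i][-1])
--     temp=list(set(temp))
--     if(len(temp)==1):
--         return False
--     else:
--         return True
-- ===== SOURCE B (Python) =====
-- def justifylabel(x):
--     if not x:
--         return True
--     ref = x[0][-1]
--     return any(row[-1] != ref for row in x[1:])
-- ===== Notes on version B (the rewrite author's own statement) =====
-- stated objective: simpler
-- what changed: B drops the label-collecting pass and the set deduplication entirely: it compares every remaining row's last element against the first row's and exits early at the first difference, instead of materialising all labels and counting distinct ones.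
import Mathlib
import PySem

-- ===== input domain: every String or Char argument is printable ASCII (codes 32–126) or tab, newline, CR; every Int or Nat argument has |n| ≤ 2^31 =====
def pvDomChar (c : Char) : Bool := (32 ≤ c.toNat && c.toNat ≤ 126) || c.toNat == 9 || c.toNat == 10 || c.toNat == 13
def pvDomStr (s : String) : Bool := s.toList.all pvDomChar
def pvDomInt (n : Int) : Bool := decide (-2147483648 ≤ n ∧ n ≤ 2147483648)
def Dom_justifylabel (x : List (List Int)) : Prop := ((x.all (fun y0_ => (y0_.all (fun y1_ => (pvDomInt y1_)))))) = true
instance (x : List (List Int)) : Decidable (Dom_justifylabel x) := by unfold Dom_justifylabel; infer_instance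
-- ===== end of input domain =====

-- B replaces A's collect-all-labels-then-deduplicate pass by an early-exit scan
-- comparing each row's last element with the first row's (objective: simpler).

-- ===== PORT A =====
def justifylabel (x : List (List Int)) : Bool :=
  let temp : List Int :=
    (PySem.List.pyRange 0 (x.length : Int) 1).foldl
      (fun acc i => acc ++ [PySem.List.pyGetD (PySem.List.pyGetD x i []) (-1) 0]) []
  let temp2 : PySem.Set Int := PySem.Set.ofList temp
  if temp2.length == 1 then false else true

-- ===== PORT B =====
def justifylabel_alt (x : List (List Int)) : Bool :=
  match x with
  | [] => true
  | r :: rest =>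
    let ref := PySem.List.pyGetD r (-1) 0
    rest.any (fun row => PySem.List.pyGetD row (-1) 0 != ref)

-- ===== PRECONDITION & SPEC =====
-- A raises IndexError (x[i][-1]) on any empty row; Pre_ excludes exactly those inputs.
def Pre_justifylabel (x : List (List Int)) : Prop := ∀ r ∈ x, r ≠ []
instance (x : List (List Int)) : Decidable (Pre_justifylabel x) := by unfold Pre_justifylabel; infer_instance
def pvWitness_justifylabel : List (List Int) := [[1, 2], [3, 2], [4, 5]]

def Spec_justifylabel (x : List (List Int)) (out : Bool) : Prop := out = justifylabel_alt x
instance (x : List (List Int)) (out : Bool) : Decidable (Spec_justifylabel x out) := by unfold Spec_justifylabel; infer_instance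

-- ===== CLAIM (what is proved, stated in full; the proofs are below) =====
def Claim_equal_justifylabel : Prop := ∀ (x : List (List Int)), Dom_justifylabel x → Pre_justifylabel x → Spec_justifylabel x (justifylabel x)

-- ===== LEMMAS AND PROOFS =====

theorem pv_len_add_ge (s : PySem.Set Int) (b : Int) : s.length ≤ (PySem.Set.add s b).length := by
  unfold PySem.Set.add
  split
  · exact Nat.le_refl _
  · simp

theorem pv_len_foldl_add_ge : ∀ (t : List Int) (s : PySem.Set Int),
    s.length ≤ (t.foldl PySem.Set.add s).length := by
  intro t
  induction t with
  | nil => intro s; simp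
  | cons b t ih =>
    intro s
    exact Nat.le_trans (pv_len_add_ge s b) (ih (PySem.Set.add s b))

theorem pv_key : ∀ (t : List Int) (a : Int),
    ((t.foldl PySem.Set.add [a]).length = 1) ↔ (∀ b ∈ t, b = a) := by
  intro t
  induction t with
  | nil => intro a; simp
  | cons b t ih =>
    intro a
    by_cases hb : b = a
    · subst hb
      have hadd : PySem.Set.add [b] b = [b] := by
        unfold PySem.Set.add; simp [PySem.Set.contains]
      simp only [List.foldl_cons, hadd]
      simp [ih b]
    · have hadd : PySem.Set.add [a] b = [a, b] := by
        unfold PySem.Set.add; simp [PySem.Set.contains, hb]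
      have hge : ([a, b] : List Int).length ≤ (t.foldl PySem.Set.add [a, b]).length :=
        pv_len_foldl_add_ge t [a, b]
      constructor
      · intro h
        rw [List.foldl_cons, hadd] at h
        simp only [List.length_cons, List.length_nil] at hge
        omega
      · intro h
        exact absurd (h b (List.mem_cons_self)) hb

theorem pv_temp_eq_map (x : List (List Int)) :
    (PySem.List.pyRange 0 (x.length : Int) 1).foldl
      (fun acc i => acc ++ [PySem.List.pyGetD (PySem.List.pyGetD x i []) (-1) 0]) []
    = x.map (fun r => PySem.List.pyGetD r (-1) 0) := by
  rw [PySem.List.foldl_pyRange_zero_pyGetD' x ([] : List Int)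
      (fun acc row => acc ++ [PySem.List.pyGetD row (-1) 0]) []]
  exact PySem.List.foldl_append_singleton_eq_map _ _ _

-- ===== VERDICT (by name: the statement is the Claim_ definition above) =====
theorem justifylabel_spec : Claim_equal_justifylabel := by
  intro x _ _
  unfold Spec_justifylabel justifylabel justifylabel_alt
  simp only [pv_temp_eq_map]
  cases x with
  | nil => simp [PySem.Set.ofList]
  | cons r rest =>
    set g : List Int → Int := fun r => PySem.List.pyGetD r (-1) 0 with hg
    have hofl : PySem.Set.ofList ((r :: rest).map g)
        = (rest.map g).foldl PySem.Set.add [g r] := by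
      simp [PySem.Set.ofList_eq_foldl, PySem.Set.add, PySem.Set.contains]
    by_cases hall : ∀ b ∈ rest.map g, b = g r
    · have h1 : ((rest.map g).foldl PySem.Set.add [g r]).length = 1 :=
        (pv_key (rest.map g) (g r)).mpr hall
      simp only [hofl, h1]
      simp only [beq_self_eq_true, if_true]
      symm
      simp only [List.any_eq_false]
      intro row hrow
      have := hall (g row) (List.mem_map_of_mem hrow)
      simp only [bne_iff_ne, ne_eq, not_not]
      exact this
    · have h1 : ((rest.map g).foldl PySem.Set.add [g r]).length ≠ 1 :=
        fun h => hall ((pv_key (rest.map g) (g r)).mp h)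
      simp only [hofl]
      rw [if_neg (by simpa using h1)]
      symm
      simp only [List.any_eq_true]
      push Not at hall
      obtain ⟨b, hb, hne⟩ := hall
      obtain ⟨row, hrow, hbr⟩ := List.mem_map.mp hb
      exact ⟨row, hrow, by simp only [bne_iff_ne, ne_eq]; rw [show PySem.List.pyGetD row (-1) 0 = g row from rfl, hbr]; exact hne⟩
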